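-- pv_equiv track=rewrite | github.com/qrmbqh/Efficient-SKU-to-Rack-Assignment-via-Correlation-Optimization | functions.py | genMatricxAbyOrders
-- ===== SOURCE A (Python) =====
-- def genMatricxAbyOrders(orders, skuNum):
--     A = []
--     for order in orders:
--         temp = []
--         for sku in range(skuNum):
--             if sku in orders[order]:
--                 temp.append(1)
--             else:
--                 temp.append(0)
--         A.append(temp)
--     return A
-- ===== SOURCE B (Python) =====
-- def genMatricxAbyOrders(orders, skuNum):
--     def row_for(vals):
--         row = [0] * skuNum
--         for s in vals:
--             if 0 <= s < skuNum:
--                 row[s] = 1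
--         return row
--     return [row_for(orders[order]) for order in orders]
-- ===== Notes on version B (the rewrite author's own statement) =====
-- stated objective: alternative
-- what changed: Replaces A's accumulator loop with a dense per-column membership scan by a comprehension mapping each order key to a sparsely scattered row: a zero row is allocated once and row[s]=1 is set only for the skus the order actually contains (with the 0 <= s < skuNum bound A's membership test implies).
import Mathlib
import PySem

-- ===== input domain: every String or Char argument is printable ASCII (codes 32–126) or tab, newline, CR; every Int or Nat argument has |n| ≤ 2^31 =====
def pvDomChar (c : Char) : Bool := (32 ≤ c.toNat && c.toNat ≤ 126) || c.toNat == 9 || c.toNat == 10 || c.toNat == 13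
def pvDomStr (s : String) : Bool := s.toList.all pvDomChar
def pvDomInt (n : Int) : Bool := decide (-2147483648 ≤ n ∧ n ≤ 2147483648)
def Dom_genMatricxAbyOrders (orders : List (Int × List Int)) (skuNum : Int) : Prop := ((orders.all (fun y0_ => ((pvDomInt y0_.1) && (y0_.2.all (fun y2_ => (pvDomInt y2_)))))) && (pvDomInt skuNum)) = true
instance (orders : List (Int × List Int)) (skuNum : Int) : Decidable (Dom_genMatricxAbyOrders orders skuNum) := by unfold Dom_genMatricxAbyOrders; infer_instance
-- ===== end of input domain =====

-- B replaces A's accumulator loop with dense per-column membership by a map producing sparsely scattered rows (a different per-row algorithm and decomposition).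
-- Pre_ excludes association lists with duplicate keys (they are ambiguous as a representation of A's dict input).


-- ===== PORT A =====
-- orders[order]: first-match lookup in the association list (Python dict lookup; the key always comes from the dict itself, so KeyError cannot occur)
def pvLookup (orders : List (Int × List Int)) (k : Int) : List Int :=
  ((orders.find? (fun p => p.1 == k)).map Prod.snd).getD []

def genMatricxAbyOrders (orders : List (Int × List Int)) (skuNum : Int) : List (List Int) :=
  orders.foldl (fun A p =>
    A ++ [ (PySem.List.pyRange 0 skuNum 1).foldl
             (fun temp sku => temp ++ [if (pvLookup orders p.1).contains sku then 1 else 0]) [] ]) []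

-- ===== PORT B =====
-- B's lookup of orders[order] (first match, as in a Python dict without duplicate keys)
def pvLookupB (orders : List (Int × List Int)) (k : Int) : List Int :=
  match orders.find? (fun p => p.1 == k) with
  | some p => p.2
  | none => []

-- the 'for s in vals: if 0 <= s < skuNum: row[s] = 1' loop, as structural recursion on vals
def pvScatter (skuNum : Int) (row : List Int) (vals : List Int) : List Int :=
  match vals with
  | [] => row
  | s :: rest =>
      pvScatter skuNum (if 0 ≤ s ∧ s < skuNum then PySem.List.pySetD row s 1 else row) rest

def pvRowFor (skuNum : Int) (vals : List Int) : List Int :=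
  pvScatter skuNum (List.replicate skuNum.toNat 0) vals

def genMatricxAbyOrders_alt (orders : List (Int × List Int)) (skuNum : Int) : List (List Int) :=
  orders.map (fun p => pvRowFor skuNum (pvLookupB orders p.1))

-- ===== PRECONDITION & SPEC =====
-- Pre_ excludes association lists with duplicate keys: they do not faithfully represent a
-- Python dict (Python collapses duplicates, keeping the last value), so A's dict input is
-- ambiguous there; it excludes nothing else.
def Pre_genMatricxAbyOrders (orders : List (Int × List Int)) (_skuNum : Int) : Prop :=
  (orders.map Prod.fst).Nodup
instance (orders : List (Int × List Int)) (skuNum : Int) : Decidable (Pre_genMatricxAbyOrders orders skuNum) := by unfold Pre_genMatricxAbyOrders; infer_instance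

def pvWitness_genMatricxAbyOrders : (List (Int × List Int)) × Int := ([(0, [0, 2]), (1, [])], 3)

def Spec_genMatricxAbyOrders (orders : List (Int × List Int)) (skuNum : Int) (out : List (List Int)) : Prop := out = genMatricxAbyOrders_alt orders skuNum
instance (orders : List (Int × List Int)) (skuNum : Int) (out : List (List Int)) : Decidable (Spec_genMatricxAbyOrders orders skuNum out) := by unfold Spec_genMatricxAbyOrders; infer_instance

-- ===== CLAIM (what is proved, stated in full; the proofs are below) =====
def Claim_equal_genMatricxAbyOrders : Prop := ∀ (orders : List (Int × List Int)) (skuNum : Int), Dom_genMatricxAbyOrders orders skuNum → Pre_genMatricxAbyOrders orders skuNum → Spec_genMatricxAbyOrders orders skuNum (genMatricxAbyOrders orders skuNum)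

-- ===== LEMMAS AND PROOFS =====

theorem lookup_eq (orders : List (Int × List Int)) (k : Int) :
    pvLookup orders k = pvLookupB orders k := by
  unfold pvLookup pvLookupB
  cases orders.find? (fun p => p.1 == k) <;> simp

-- B's scatter recursion, started from any row of length n.toNat, yields the pointwise description:
-- entry k is 1 when k occurs in vals and the starting row's entry otherwise.
theorem scatter_eq (n : Int) (vals : List Int) :
    ∀ row : List Int, row.length = n.toNat →
      pvScatter n row vals
        = (List.range n.toNat).map (fun k : Nat => if vals.contains (k : Int) then (1 : Int) else row.getD k 0) := by
  induction vals with
  | nil =>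
    intro row h
    unfold pvScatter
    refine List.ext_getElem (by simp [h]) ?_
    intro i h1 h2
    simp only [List.length_map, List.length_range] at h2
    simp [List.getD_eq_getElem?_getD, List.getElem?_eq_getElem (show i < row.length by omega)]
  | cons s vs ih =>
    intro row hrow
    unfold pvScatter
    by_cases hg : 0 ≤ s ∧ s < n
    · have hlen : (PySem.List.pySetD row s 1).length = n.toNat := by
        rw [PySem.List.pySetD_of_nonneg row 1 hg.1]; simpa using hrow
      rw [if_pos hg, ih _ hlen]
      apply List.map_congr_left
      intro k hk
      rw [List.mem_range] at hk
      rw [PySem.List.pySetD_of_nonneg row 1 hg.1]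
      by_cases hvs : (k : Int) ∈ vs
      · simp [hvs]
      · by_cases hs : (k : Int) = s
        · have hkl : k < row.length := by omega
          have hsk : s.toNat = k := by omega
          simp [hs, List.getD_eq_getElem?_getD, hsk, hkl]
        · have hsk : s.toNat ≠ k := by omega
          simp [hvs, hs, List.getD_eq_getElem?_getD, hsk]
    · rw [if_neg hg, ih _ hrow]
      apply List.map_congr_left
      intro k hk
      rw [List.mem_range] at hk
      by_cases hvs : (k : Int) ∈ vs
      · simp [hvs]
      · have hs : ¬((k : Int) = s) := by
          intro h; exact hg ⟨by omega, by omega⟩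
        simp [hvs, hs]

-- A's inner loop over range(skuNum) builds the same pointwise row.
theorem rowA_eq (n : Int) (vals : List Int) :
    (PySem.List.pyRange 0 n 1).foldl (fun temp sku => temp ++ [if vals.contains sku then (1 : Int) else 0]) []
      = (List.range n.toNat).map (fun k : Nat => if vals.contains (k : Int) then (1 : Int) else 0) := by
  rw [PySem.List.foldl_append_singleton_eq_map, PySem.List.pyRange_one]
  simp [List.map_map, Function.comp_def]

theorem genMatricxAbyOrders_spec : Claim_equal_genMatricxAbyOrders := by
  unfold Claim_equal_genMatricxAbyOrders
  intro orders skuNum _ _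
  unfold Spec_genMatricxAbyOrders genMatricxAbyOrders genMatricxAbyOrders_alt
  rw [PySem.List.foldl_append_singleton_eq_map]
  simp only [List.nil_append]
  apply List.map_congr_left
  intro p hp
  rw [rowA_eq]
  unfold pvRowFor
  rw [scatter_eq skuNum _ _ (by simp), lookup_eq]
  apply List.map_congr_left
  intro k hk
  rw [List.mem_range] at hk
  simp [List.getD_eq_getElem?_getD, hk]
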